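-- pv_equiv track=rewrite | github.com/MegaGiciorPortas/WDI-Zadania | 05-rekurencja/5.186.py | recurension
-- ===== SOURCE A (Python) =====
-- def recurension(T, indeks, diff, current, wanted):
--     if indeks >= len(T):
--         return current == 0 or current == wanted
--
--     if current > wanted:
--         return False
--
--     if current == wanted:
--         return recurension(T, indeks + 1, diff, T[indeks], wanted + diff)
--
--     return recurension(T, indeks + 1, diff, current + T[indeks], wanted)
-- ===== SOURCE B (Python) =====
-- def recurension(T, indeks, diff, current, wanted):
--     n = len(T)
--     while True:
--         if indeks >= n:
--             return current == 0 or current == wanted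
--         if current > wanted:
--             return False
--         if current == wanted:
--             current = T[indeks]
--             wanted += diff
--         else:
--             current += T[indeks]
--         indeks += 1
-- ===== Notes on version B (the rewrite author's own statement) =====
-- stated objective: idiomatic
-- what changed: Replaces the recursive chain with an explicit while-True loop over local state (indeks, current, wanted), avoiding Python call-stack recursion.
import Mathlib
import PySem

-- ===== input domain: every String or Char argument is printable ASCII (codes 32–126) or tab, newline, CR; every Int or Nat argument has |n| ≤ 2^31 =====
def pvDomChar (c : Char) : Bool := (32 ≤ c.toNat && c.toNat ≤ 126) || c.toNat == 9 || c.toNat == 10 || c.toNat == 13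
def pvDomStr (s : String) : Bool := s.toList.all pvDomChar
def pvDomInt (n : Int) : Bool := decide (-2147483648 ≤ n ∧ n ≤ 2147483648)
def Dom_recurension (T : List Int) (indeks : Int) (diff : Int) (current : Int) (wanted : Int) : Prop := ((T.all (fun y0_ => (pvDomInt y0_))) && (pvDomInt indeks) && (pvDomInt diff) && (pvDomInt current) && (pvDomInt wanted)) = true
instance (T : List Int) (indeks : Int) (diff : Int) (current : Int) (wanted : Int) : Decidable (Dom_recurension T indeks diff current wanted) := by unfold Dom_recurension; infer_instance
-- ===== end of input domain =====

-- B replaces the recursive chain by an explicit while-loop over local state (idiomatic; return value identical).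

-- ===== PORT A =====
-- Literal transliteration of A's tail recursion; T[indeks] via pyGet? (none = IndexError, excluded by Pre_).
def recurension (T : List Int) (indeks : Int) (diff : Int) (current : Int) (wanted : Int) : Bool :=
  if indeks ≥ (T.length : Int) then
    decide (current = 0) || decide (current = wanted)
  else if current > wanted then
    false
  else if current = wanted then
    recurension T (indeks + 1) diff ((PySem.List.pyGet? T indeks).getD 0) (wanted + diff)
  else
    recurension T (indeks + 1) diff (current + (PySem.List.pyGet? T indeks).getD 0) wanted
termination_by ((T.length : Int) - indeks).toNat
decreasing_by all_goals omega

-- ===== PORT B =====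
-- B's while-True loop: the loop body updates the mutable state (indeks, current, wanted) and repeats.
def recurensionLoop (T : List Int) (n : Int) (indeks : Int) (diff : Int) (current : Int) (wanted : Int) : Bool :=
  if indeks ≥ n then
    decide (current = 0) || decide (current = wanted)
  else if current > wanted then
    false
  else
    let t := (PySem.List.pyGet? T indeks).getD 0
    let st := if current = wanted then (t, wanted + diff) else (current + t, wanted)
    recurensionLoop T n (indeks + 1) diff st.1 st.2
termination_by (n - indeks).toNat
decreasing_by omega

def recurension_alt (T : List Int) (indeks : Int) (diff : Int) (current : Int) (wanted : Int) : Bool :=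
  recurensionLoop T (T.length : Int) indeks diff current wanted

-- ===== PRECONDITION & SPEC =====
-- Pre_ excludes exactly the inputs where Python A raises IndexError: a negative start index below
-- -len(T) that is actually dereferenced (i.e. unless current > wanted, which returns False first).
def Pre_recurension (T : List Int) (indeks : Int) (diff : Int) (current : Int) (wanted : Int) : Prop :=
  indeks ≥ -(T.length : Int) ∨ current > wanted
instance (T : List Int) (indeks : Int) (diff : Int) (current : Int) (wanted : Int) : Decidable (Pre_recurension T indeks diff current wanted) := by unfold Pre_recurension; infer_instance
def pvWitness_recurension : List Int × Int × Int × Int × Int := ([1, 2, 3, 3], 0, 3, 0, 3)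

def Spec_recurension (T : List Int) (indeks : Int) (diff : Int) (current : Int) (wanted : Int) (out : Bool) : Prop := out = recurension_alt T indeks diff current wanted
instance (T : List Int) (indeks : Int) (diff : Int) (current : Int) (wanted : Int) (out : Bool) : Decidable (Spec_recurension T indeks diff current wanted out) := by unfold Spec_recurension; infer_instance

-- ===== CLAIM (what is proved, stated in full; the proofs are below) =====
def Claim_equal_recurension : Prop := ∀ (T : List Int) (indeks : Int) (diff : Int) (current : Int) (wanted : Int), Dom_recurension T indeks diff current wanted → Pre_recurension T indeks diff current wanted → Spec_recurension T indeks diff current wanted (recurension T indeks diff current wanted)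

-- ===== LEMMAS AND PROOFS =====

-- The two programs agree on every input (the precondition is not even needed for the return value).
theorem recurension_eq_loop (T : List Int) (indeks diff current wanted : Int) :
    recurension T indeks diff current wanted
      = recurensionLoop T (T.length : Int) indeks diff current wanted := by
  fun_induction recurension T indeks diff current wanted <;>
    rw [recurensionLoop] <;> split_ifs <;> simp_all <;> omega

-- ===== VERDICT (by name: the statement is the Claim_ definition above) =====
theorem recurension_spec : Claim_equal_recurension := by
  intro T indeks diff current wanted _ _
  unfold Spec_recurension recurension_alt
  exact recurension_eq_loop T indeks diff current wanted
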